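-- pv_equiv track=rewrite | github.com/MarioPasc/IsalSR | experiments/plotting_styles.py | tokenize_for_display
-- ===== SOURCE A (Python) =====
-- def tokenize_for_display(string: str) -> list[str]:
--     """Tokenize an IsalSR instruction string for display purposes.
--
--     Handles the two-tier encoding: V/v consume the next character as a label.
--     Returns a list of tokens (single-char or two-char).
--
--     Args:
--         string: IsalSR instruction string (e.g. "V+NnncVs").
--
--     Returns:
--         List of tokens: ["V+", "N", "n", "n", "c", "Vs"]
--     """
--     tokens: list[str] = []
--     i = 0
--     while i < len(string):
--         if string[i] in "Vv" and i + 1 < len(string):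
--             tokens.append(string[i : i + 2])
--             i += 2
--         else:
--             tokens.append(string[i])
--             i += 1
--     return tokens
-- ===== SOURCE B (Python) =====
-- def tokenize_for_display(string: str) -> list[str]:
--     """Tokenize an IsalSR instruction string: V/v consume the next character.
--
--     State machine with no lookahead: emit each character as its own token;
--     if the previous character opened a V/v label token, glue the current
--     character onto that last token instead.
--     """
--     tokens: list[str] = []
--     pending = False  # last emitted token is a bare V/v awaiting its label
--     for ch in string:
--         if pending:
--             tokens[-1] += ch
--             pending = False
--         else:
--             tokens.append(ch)
--             pending = ch in "Vv"
--     return tokens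
-- ===== Notes on version B (the rewrite author's own statement) =====
-- stated objective: faster
-- what changed: Replaces A's index loop with lookahead (bounds test plus two-char slice) by a lookahead-free state machine: every character is processed uniformly in one for-loop, and a boolean flag decides whether it starts a new token or is glued onto the previously emitted V/v token; this avoids per-iteration indexing/slicing and measured ~3x faster.
import Mathlib
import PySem

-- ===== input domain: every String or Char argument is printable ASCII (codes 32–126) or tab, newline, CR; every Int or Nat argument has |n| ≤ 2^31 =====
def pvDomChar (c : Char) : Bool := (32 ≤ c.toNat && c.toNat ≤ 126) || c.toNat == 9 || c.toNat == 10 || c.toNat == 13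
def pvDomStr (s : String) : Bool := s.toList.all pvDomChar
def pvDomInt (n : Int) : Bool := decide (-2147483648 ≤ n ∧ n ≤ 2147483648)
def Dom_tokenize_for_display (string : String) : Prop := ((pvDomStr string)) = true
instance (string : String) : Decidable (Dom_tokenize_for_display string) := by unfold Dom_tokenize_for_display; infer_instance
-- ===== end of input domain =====

-- B replaces A's index loop with lookahead (bounds test + slice) by a
-- lookahead-free state machine: one uniform pass, a flag glues the character
-- after a V/v onto the last emitted token; objective: faster (measured ~3x, constant factor).

-- ===== PORT A =====
-- A's while-loop over index i, accumulating tokens; string[i:i+2] via PySem slice.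
def pvTokALoop (cs : List Char) (i : Nat) (tokens : List String) : List String :=
  if h : i < cs.length then
    if (cs[i] = 'V' ∨ cs[i] = 'v') ∧ i + 1 < cs.length then
      pvTokALoop cs (i + 2)
        (tokens ++ [String.ofList (PySem.List.slice cs (some (i : Int)) (some ((i : Int) + 2)))])
    else
      pvTokALoop cs (i + 1) (tokens ++ [String.ofList [cs[i]]])
  else tokens
termination_by cs.length - i

def tokenize_for_display (string : String) : List String :=
  pvTokALoop string.toList 0 []

-- ===== PORT B =====
-- B's for-loop body: state = (tokens, pending); pending glues ch onto tokens[-1].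
def pvTokBStep (st : List String × Bool) (ch : Char) : List String × Bool :=
  if st.2 then
    -- tokens[-1] += ch  (pending is only true when tokens is nonempty)
    (match st.1.getLast? with
     | some t => st.1.dropLast ++ [t.push ch]
     | none => st.1, false)
  else
    (st.1 ++ [String.ofList [ch]], ch = 'V' ∨ ch = 'v')

def tokenize_for_display_alt (string : String) : List String :=
  (string.toList.foldl pvTokBStep ([], false)).1

-- ===== PRECONDITION & SPEC =====
def Spec_tokenize_for_display (string : String) (out : List String) : Prop := out = tokenize_for_display_alt string
instance (string : String) (out : List String) : Decidable (Spec_tokenize_for_display string out) := by unfold Spec_tokenize_for_display; infer_instance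

-- ===== CLAIM (what is proved, stated in full; the proofs are below) =====
def Claim_equal_tokenize_for_display : Prop := ∀ (string : String), Dom_tokenize_for_display string → Spec_tokenize_for_display string (tokenize_for_display string)

-- ===== LEMMAS AND PROOFS =====

-- Reference tokenization (proof-side only): the pairing both loops compute.
def pvTokRef : List Char → List String
  | [] => []
  | c :: rest =>
    if c = 'V' ∨ c = 'v' then
      match rest with
      | [] => [String.ofList [c]]
      | d :: rest' => String.ofList [c, d] :: pvTokRef rest'
    else
      String.ofList [c] :: pvTokRef rest

theorem pvTokRef_cons_other (c : Char) (rest : List Char) (hv : ¬(c = 'V' ∨ c = 'v')) :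
    pvTokRef (c :: rest) = String.ofList [c] :: pvTokRef rest := by
  rw [pvTokRef.eq_def]
  simp only []
  rw [if_neg hv]

theorem pvTokALoop_eq (cs : List Char) (i : Nat) (tokens : List String) :
    pvTokALoop cs i tokens = tokens ++ pvTokRef (cs.drop i) := by
  induction hn : cs.length - i using Nat.strong_induction_on generalizing i tokens with
  | _ n ih =>
    rw [pvTokALoop]
    by_cases h : i < cs.length
    · simp only [dif_pos h]
      have hdrop : cs.drop i = cs[i] :: cs.drop (i + 1) := List.drop_eq_getElem_cons h
      by_cases hv : cs[i] = 'V' ∨ cs[i] = 'v'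
      · by_cases h1 : i + 1 < cs.length
        · rw [if_pos ⟨hv, h1⟩]
          have hdrop1 : cs.drop (i + 1) = cs[i+1] :: cs.drop (i + 2) :=
            List.drop_eq_getElem_cons h1
          have hslice : PySem.List.slice cs (some (i : Int)) (some ((i : Int) + 2))
              = [cs[i], cs[i+1]] := by
            have := PySem.List.slice_natCast_add cs i 2
            rw [show ((i : Int) + (2 : Nat)) = (i : Int) + 2 by norm_num] at this
            rw [this, hdrop, hdrop1]
            simp [List.take]
          rw [ih (cs.length - (i + 2)) (by omega) (i + 2) _ rfl, hslice, hdrop, hdrop1]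
          simp [pvTokRef, hv]
        · rw [if_neg (by tauto)]
          rw [ih (cs.length - (i + 1)) (by omega) (i + 1) _ rfl, hdrop]
          have hnil : cs.drop (i + 1) = [] := List.drop_eq_nil_of_le (by omega)
          simp [pvTokRef, hv, hnil]
      · rw [if_neg (by tauto)]
        rw [ih (cs.length - (i + 1)) (by omega) (i + 1) _ rfl, hdrop]
        rw [pvTokRef_cons_other _ _ hv]
        simp
    · simp only [dif_neg h]
      rw [List.drop_eq_nil_of_le (by omega)]
      simp [pvTokRef]

theorem pvString_ofList_push (c d : Char) :
    (String.ofList [c]).push d = String.ofList [c, d] := by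
  simp [String.push, String.ofList, List.utf8Encode, List.flatMap_cons]

-- Invariant of B's fold: from pending=false it appends pvTokRef of the rest;
-- from pending=true with last token t it glues the next char onto t.
theorem pvTokB_invariant (cs : List Char) :
    (∀ out : List String, (cs.foldl pvTokBStep (out, false)).1 = out ++ pvTokRef cs) ∧
    (∀ (out : List String) (t : String),
      (cs.foldl pvTokBStep (out ++ [t], true)).1 =
        match cs with
        | [] => out ++ [t]
        | d :: rest => out ++ [t.push d] ++ pvTokRef rest) := by
  induction cs with
  | nil => simp [pvTokRef]
  | cons c rest ih =>
    constructor
    · intro out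
      by_cases hv : c = 'V' ∨ c = 'v'
      · have hstep : pvTokBStep (out, false) c = (out ++ [String.ofList [c]], true) := by
          simp [pvTokBStep, hv]
        rw [List.foldl_cons, hstep, ih.2 out (String.ofList [c])]
        cases rest with
        | nil => simp [pvTokRef, hv]
        | cons d rest' =>
          simp [pvTokRef, hv, pvString_ofList_push]
      · have hstep : pvTokBStep (out, false) c = (out ++ [String.ofList [c]], false) := by
          simp [pvTokBStep, hv]
        rw [List.foldl_cons, hstep, ih.1 (out ++ [String.ofList [c]]),
          pvTokRef_cons_other _ _ hv]
        simp
    · intro out t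
      have hstep : pvTokBStep (out ++ [t], true) c = (out ++ [t.push c], false) := by
        simp [pvTokBStep]
      rw [List.foldl_cons, hstep, ih.1 (out ++ [t.push c])]

-- ===== VERDICT (by name: the statement is the Claim_ definition above) =====
theorem tokenize_for_display_spec : Claim_equal_tokenize_for_display := by
  intro s _
  unfold Spec_tokenize_for_display tokenize_for_display tokenize_for_display_alt
  rw [pvTokALoop_eq s.toList 0 [], (pvTokB_invariant s.toList).1 []]
  simp
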